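-- pv_equiv track=rewrite | github.com/buaabuaazk/contributing_file_classify | src/verify_titles.py | clean_title_line
-- ===== SOURCE A (Python) =====
-- def clean_title_line(line):
--     """
--     清理标题行，去除开头的所有#和-符号以及其后的空格，
--     最后去除所有反引号（`）和星号（*）
--     """
--     # 去除开头的所有#和-符号以及其后的空格
--     clean_line = line.strip()
--     while clean_line.startswith('#') or clean_line.startswith('-'):
--         if clean_line.startswith('#'):
--             clean_line = clean_line[1:].lstrip()
--         elif clean_line.startswith('-'):
--             clean_line = clean_line[1:].lstrip()
--
--     # 去除左右空格
--     clean_line = clean_line.strip()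
--
--     # 去除所有反引号
--     clean_line = clean_line.replace('`', '')
--
--     # 去除所有星号
--     clean_line = clean_line.replace('*', '')
--
--     return clean_line
-- ===== SOURCE B (Python) =====
-- def clean_title_line(line):
--     s = line.strip()
--     i = 0
--     while i < len(s) and (s[i] in '#-' or s[i].isspace()):
--         i += 1
--     return s[i:].strip().replace('`', '').replace('*', '')
-- ===== Notes on version B (the rewrite author's own statement) =====
-- stated objective: simpler
-- what changed: Replaces A's while loop of repeated startswith tests, slicing and lstrip (which rebuilds and rescans the shrinking string each iteration) with a single left-to-right index walk that finds the first character that is not '#', '-' or whitespace, then one slice.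
import Mathlib
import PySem

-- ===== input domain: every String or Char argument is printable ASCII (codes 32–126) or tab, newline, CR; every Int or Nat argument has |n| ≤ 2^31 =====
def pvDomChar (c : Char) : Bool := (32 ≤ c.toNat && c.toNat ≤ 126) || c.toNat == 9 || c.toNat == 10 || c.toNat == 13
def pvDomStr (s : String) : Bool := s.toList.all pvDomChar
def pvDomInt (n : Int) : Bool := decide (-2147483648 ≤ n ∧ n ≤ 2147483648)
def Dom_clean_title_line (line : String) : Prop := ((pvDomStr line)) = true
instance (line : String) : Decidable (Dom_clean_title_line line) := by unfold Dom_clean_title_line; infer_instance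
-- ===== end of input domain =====

-- B changes A's repeated startswith/slice/lstrip loop into a single forward walk past '#'/'-'/whitespace; objective: simpler.

-- ===== PORT A =====
-- the while loop: repeatedly drop a leading '#' or '-' and then lstrip
def cleanLoopA (cs : List Char) : List Char :=
  if PySem.Chars.startswith cs ['#'] then
    cleanLoopA (PySem.Chars.lstrip (PySem.List.slice cs (some 1) none))
  else if PySem.Chars.startswith cs ['-'] then
    cleanLoopA (PySem.Chars.lstrip (PySem.List.slice cs (some 1) none))
  else cs
termination_by cs.length
decreasing_by
  all_goals
    cases cs with
    | nil => simp [PySem.Chars.startswith] at *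
    | cons c rest =>
        have h1 : PySem.List.slice (c :: rest) (some 1) none = rest := by
          rw [PySem.List.slice_from (c :: rest) (by norm_num : (0:Int) ≤ 1)]
          simp
        rw [h1]
        have := List.length_dropWhile_le (p := PySem.Chars.isspace) (l := rest)
        simp [PySem.Chars.lstrip]
        omega

def clean_title_line (line : String) : String :=
  let cl0 := PySem.Chars.strip line.toList
  let cl1 := cleanLoopA cl0
  let cl2 := PySem.Chars.strip cl1
  let cl3 := PySem.Chars.replace cl2 ['`'] []
  let cl4 := PySem.Chars.replace cl3 ['*'] []
  String.ofList cl4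

-- ===== PORT B =====
-- the index walk 'while i < len(s) and (s[i] in "#-" or s[i].isspace()): i += 1; s[i:]'
def bSkip (cs : List Char) : List Char :=
  match cs with
  | [] => []
  | c :: rest =>
      if c = '#' || c = '-' || PySem.Chars.isspace c then bSkip rest else c :: rest

def clean_title_line_alt (line : String) : String :=
  let s := PySem.Chars.strip line.toList
  String.ofList (PySem.Chars.replace (PySem.Chars.replace
    (PySem.Chars.strip (bSkip s)) ['`'] []) ['*'] [])

-- ===== PRECONDITION & SPEC =====
def Spec_clean_title_line (line : String) (out : String) : Prop := out = clean_title_line_alt line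
instance (line : String) (out : String) : Decidable (Spec_clean_title_line line out) := by unfold Spec_clean_title_line; infer_instance

-- ===== CLAIM (what is proved, stated in full; the proofs are below) =====
def Claim_equal_clean_title_line : Prop := ∀ (line : String), Dom_clean_title_line line → Spec_clean_title_line line (clean_title_line line)

-- ===== LEMMAS AND PROOFS =====

-- A's loop, started on an lstripped string, lands where B's walk lands.
theorem loop_eq_skip (cs : List Char) :
    cleanLoopA (PySem.Chars.lstrip cs) = bSkip cs := by
  induction cs with
  | nil => simp [PySem.Chars.lstrip, bSkip]; rw [cleanLoopA]; simp [PySem.Chars.startswith]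
  | cons c rest ih =>
    by_cases hs : PySem.Chars.isspace c
    · have : PySem.Chars.lstrip (c :: rest) = PySem.Chars.lstrip rest := by
        simp [PySem.Chars.lstrip, hs]
      rw [this, ih, bSkip]
      simp [hs]
    · have hl : PySem.Chars.lstrip (c :: rest) = c :: rest := by
        simp [PySem.Chars.lstrip, hs]
      rw [hl]
      have hslice : PySem.List.slice (c :: rest) (some 1) none = rest := by
        rw [PySem.List.slice_from (c :: rest) (by norm_num : (0:Int) ≤ 1)]
        simp
      by_cases h1 : c = '#'
      · subst h1
        rw [cleanLoopA]
        simp [PySem.Chars.startswith, List.isPrefixOf, bSkip]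
        rw [hslice, ih]
      · by_cases h2 : c = '-'
        · subst h2
          rw [cleanLoopA]
          simp [PySem.Chars.startswith, List.isPrefixOf, bSkip]
          rw [hslice, ih]
        · have h1' : ¬ ('#' = c) := fun h => h1 h.symm
          have h2' : ¬ ('-' = c) := fun h => h2 h.symm
          rw [cleanLoopA]
          simp [PySem.Chars.startswith, List.isPrefixOf, h1', h2', bSkip, hs, h1, h2]

-- a string that is already lstripped stays lstripped after rstrip
theorem lstrip_strip (x : List Char) :
    PySem.Chars.lstrip (PySem.Chars.strip x) = PySem.Chars.strip x := by
  simp only [PySem.Chars.strip, PySem.Chars.rstrip, PySem.Chars.lstrip]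
  set p := PySem.Chars.isspace with hp
  set z := List.dropWhile p x with hz
  have hpre : (z.reverse.dropWhile p).reverse <+: z := by
    have hsuf : z.reverse.dropWhile p <:+ z.reverse := List.dropWhile_suffix p
    simpa using List.reverse_prefix.mpr hsuf
  cases hw : (z.reverse.dropWhile p).reverse with
  | nil => simp
  | cons a t =>
    have hz' : ∃ u, z = a :: (t ++ u) := by
      rcases hpre with ⟨u, hu⟩
      rw [hw] at hu
      exact ⟨u, by simpa using hu.symm⟩
    rcases hz' with ⟨u, hu⟩
    have hna : ¬ p a = true := by
      intro hpa
      have hidem : List.dropWhile p z = z := by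
        rw [hz]; exact List.dropWhile_idempotent p x
      rw [hu, List.dropWhile_cons, if_pos hpa] at hidem
      have hlen := congrArg List.length hidem
      rw [List.length_cons] at hlen
      have hle := List.length_dropWhile_le (p := p) (l := t ++ u)
      omega
    rw [List.dropWhile_cons, if_neg hna]

theorem list_eq (l : List Char) :
    cleanLoopA (PySem.Chars.strip l) = bSkip (PySem.Chars.strip l) := by
  conv_lhs => rw [← lstrip_strip l]
  rw [loop_eq_skip]

-- ===== VERDICT (by name: the statement is the Claim_ definition above) =====
theorem clean_title_line_spec : Claim_equal_clean_title_line := by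
  intro line _
  unfold Spec_clean_title_line clean_title_line clean_title_line_alt
  simp only []
  rw [list_eq]
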